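-- pv_equiv track=rewrite | github.com/centre-for-educational-technology/evkk | stanza-server/vocabulary_marking_handlers.py | get_repetitions
-- ===== SOURCE A (Python) =====
-- def get_repetitions(sentences, location):
--     repetitive_words_list = []
--
--     for index, sentence in enumerate(sentences):
--         lemma_map = {}
--         for word in location[index]:
--             lemma = word['lemma']
--             if lemma not in lemma_map:
--                 lemma_map[lemma] = []
--             lemma_map[lemma].append(word)
--         repetitive_words_list.append(lemma_map)
--
--     return repetitive_words_list
-- ===== SOURCE B (Python) =====
-- def get_repetitions(sentences, location):
--     result = []
--     for words in location[:len(sentences)]: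
--         lemmas = dict.fromkeys(w['lemma'] for w in words)
--         result.append({l: [w for w in words if w['lemma'] == l] for l in lemmas})
--     return result
-- ===== Notes on version B (the rewrite author's own statement) =====
-- stated objective: alternative
-- what changed: replaces the incremental build-dict-of-lists-while-scanning loop by a two-phase pass per sentence: dedup the lemma keys in first-occurrence order (dict.fromkeys) and then build each group with a per-lemma filter comprehension
import Mathlib
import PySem

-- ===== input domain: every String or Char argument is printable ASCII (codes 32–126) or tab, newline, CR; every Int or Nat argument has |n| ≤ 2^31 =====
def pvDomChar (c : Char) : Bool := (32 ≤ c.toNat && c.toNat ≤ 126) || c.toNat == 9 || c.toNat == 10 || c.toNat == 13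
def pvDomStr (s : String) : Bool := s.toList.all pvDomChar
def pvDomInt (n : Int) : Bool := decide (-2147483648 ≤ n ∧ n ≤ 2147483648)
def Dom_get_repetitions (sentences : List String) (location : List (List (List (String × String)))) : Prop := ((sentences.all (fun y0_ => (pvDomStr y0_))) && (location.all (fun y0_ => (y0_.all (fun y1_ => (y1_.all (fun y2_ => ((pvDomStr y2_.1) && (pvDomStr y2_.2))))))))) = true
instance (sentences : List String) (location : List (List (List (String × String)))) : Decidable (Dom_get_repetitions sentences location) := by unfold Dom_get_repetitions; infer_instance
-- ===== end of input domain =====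

-- B groups each sentence's words by dedup-of-lemmas + per-lemma filter instead of A's incremental
-- dict-of-lists accumulation; alternative decomposition, same results, no speed claim.

-- ===== PORT A =====
-- word['lemma'] : dict lookup on the word's association list (none = KeyError, excluded by Pre_)
def pvLemmaOf (w : List (String × String)) : Option String :=
  (PySem.Dict.mk w).get? "lemma"

-- body of A's inner loop: `if lemma not in lemma_map: lemma_map[lemma] = []` then `lemma_map[lemma].append(word)`
def pvStepA (m : PySem.Dict String (List (List (String × String)))) (w : List (String × String)) :
    PySem.Dict String (List (List (String × String))) :=
  match pvLemmaOf w with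
  | none => m          -- KeyError in Python; such inputs are outside Pre_
  | some lem =>
      let m1 := if m.contains lem then m else m.insert lem []
      m1.modify lem [] (fun l => l ++ [w])

def get_repetitions (sentences : List String) (location : List (List (List (String × String)))) : List (List (String × List (List (String × String)))) :=
  (PySem.List.enumerate sentences).foldl
    (fun acc iw =>
      let words := (PySem.List.pyGet? location iw.1).getD []   -- none = IndexError, excluded by Pre_
      let lemma_map := words.foldl pvStepA PySem.Dict.empty
      acc ++ [lemma_map.items]) []

-- ===== PORT B =====
-- per-sentence body of Source B: lemmas = dict.fromkeys(w['lemma'] for w in words);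
-- {l: [w for w in words if w['lemma'] == l] for l in lemmas}
def pvGroup (words : List (List (String × String))) : List (String × List (List (String × String))) :=
  let lemmas := PySem.List.dedup (words.filterMap pvLemmaOf)
  lemmas.map (fun l => (l, words.filter (fun w => pvLemmaOf w == some l)))

def get_repetitions_alt (sentences : List String) (location : List (List (List (String × String)))) : List (List (String × List (List (String × String)))) :=
  (PySem.List.slice location none (some (sentences.length : Int))).map pvGroup

-- ===== PRECONDITION & SPEC =====
-- Pre_ excludes exactly the inputs where Python A raises: location shorter than sentences
-- (IndexError at location[index]) or some word of an accessed sentence without a 'lemma' key (KeyError).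
def Pre_get_repetitions (sentences : List String) (location : List (List (List (String × String)))) : Prop :=
  sentences.length ≤ location.length ∧
  ∀ words ∈ location.take sentences.length, ∀ w ∈ words, "lemma" ∈ w.map Prod.fst
instance (sentences : List String) (location : List (List (List (String × String)))) : Decidable (Pre_get_repetitions sentences location) := by unfold Pre_get_repetitions; infer_instance

def pvWitness_get_repetitions : List String × (List (List (List (String × String)))) :=
  (["Koer jookseb."], [[[("lemma", "koer"), ("text", "Koer")], [("lemma", "jooksma"), ("text", "jookseb")]]])

def Spec_get_repetitions (sentences : List String) (location : List (List (List (String × String)))) (out : List (List (String × List (List (String × String))))) : Prop := out = get_repetitions_alt sentences location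
instance (sentences : List String) (location : List (List (List (String × String)))) (out : List (List (String × List (List (String × String))))) : Decidable (Spec_get_repetitions sentences location out) := by unfold Spec_get_repetitions; infer_instance

-- ===== CLAIM (what is proved, stated in full; the proofs are below) =====
def Claim_equal_get_repetitions : Prop := ∀ (sentences : List String) (location : List (List (List (String × String)))), Dom_get_repetitions sentences location → Pre_get_repetitions sentences location → Spec_get_repetitions sentences location (get_repetitions sentences location)

-- ===== LEMMAS AND PROOFS =====

-- a lemma that never occurs among the words' lemmas filters to nothing
lemma pv_filter_nil (ws : List (List (String × String))) (lem : String)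
    (h : lem ∉ ws.filterMap pvLemmaOf) :
    ws.filter (fun w => pvLemmaOf w == some lem) = [] := by
  rw [List.filter_eq_nil_iff]
  intro w hw hbeq
  exact h (List.mem_filterMap.mpr ⟨w, hw, by simpa using hbeq⟩)

-- the per-lemma entry of pvGroup, named so the proofs can speak about it
def pvPairing (ws : List (List (String × String))) (l : String) :
    String × List (List (String × String)) :=
  (l, ws.filter (fun w => pvLemmaOf w == some l))

lemma pvGroup_eq (ws : List (List (String × String))) :
    pvGroup ws = (PySem.Set.ofList (ws.filterMap pvLemmaOf)).map (pvPairing ws) := rfl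

-- A's inner grouping fold builds exactly the dict whose items list is pvGroup ws
lemma pv_fold_eq_group (ws : List (List (String × String))) :
    ws.foldl pvStepA PySem.Dict.empty = PySem.Dict.mk (pvGroup ws) := by
  induction ws using List.reverseRecOn with
  | nil => rfl
  | append_singleton ws w ih =>
    rw [List.foldl_append, List.foldl_cons, List.foldl_nil, ih,
      pvGroup_eq ws, pvGroup_eq (ws ++ [w]), List.filterMap_append]
    cases hk : pvLemmaOf w with
    | none =>
      have hp : pvPairing (ws ++ [w]) = pvPairing ws := by
        funext l; simp [pvPairing, List.filter_append, hk]
      simp [pvStepA, hk, hp]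
    | some lem =>
      have hp : pvPairing (ws ++ [w]) = fun l =>
          (l, (pvPairing ws l).2 ++ if lem == l then [w] else []) := by
        funext l; simp [pvPairing, List.filter_append, List.filter_cons, hk]
      rw [hp]
      simp only [hk, List.filterMap_cons, List.filterMap_nil,
        PySem.Set.ofList_append_singleton]
      by_cases hmem : lem ∈ PySem.Set.ofList (ws.filterMap pvLemmaOf)
      · -- lemma already present: its dict entry is extended in place
        have hcon : (PySem.Dict.mk
            ((PySem.Set.ofList (ws.filterMap pvLemmaOf)).map (pvPairing ws))).contains lem
            = true := by
          rw [PySem.Dict.contains_iff_mem_keys]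
          simp [PySem.Dict.keys_mk, List.map_map, pvPairing, Function.comp_def, hmem]
        have hnod : (PySem.Dict.mk
            ((PySem.Set.ofList (ws.filterMap pvLemmaOf)).map (pvPairing ws))).keys.Nodup := by
          simp [PySem.Dict.keys_mk, List.map_map, pvPairing, Function.comp_def,
            PySem.Set.nodup_ofList]
        have hitem : (lem, (pvPairing ws lem).2) ∈ (PySem.Dict.mk
            ((PySem.Set.ofList (ws.filterMap pvLemmaOf)).map (pvPairing ws))).items :=
          List.mem_map.mpr ⟨lem, hmem, rfl⟩
        have hgetD : (PySem.Dict.mk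
            ((PySem.Set.ofList (ws.filterMap pvLemmaOf)).map (pvPairing ws))).getD lem []
            = (pvPairing ws lem).2 :=
          PySem.Dict.getD_of_mem_items _ hitem hnod []
        rw [PySem.Set.add_of_mem hmem]
        simp only [pvStepA, hk, hcon, if_pos, PySem.Dict.modify, hgetD]
        apply PySem.Dict.ext
        rw [PySem.Dict.items_insert_of_contains _ _ hcon]
        show ((PySem.Set.ofList (ws.filterMap pvLemmaOf)).map (pvPairing ws)).map _
          = (PySem.Set.ofList (ws.filterMap pvLemmaOf)).map _
        rw [List.map_map]
        apply List.map_congr_left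
        intro l _
        by_cases hl : l = lem
        · subst hl; simp [pvPairing]
        · simp [pvPairing, hl, Ne.symm hl]
      · -- new lemma: a fresh entry is appended at the end of the dict
        have hcon : (PySem.Dict.mk
            ((PySem.Set.ofList (ws.filterMap pvLemmaOf)).map (pvPairing ws))).contains lem
            = false := by
          rw [← Bool.not_eq_true, PySem.Dict.contains_iff_mem_keys]
          simpa [PySem.Dict.keys_mk, List.map_map, pvPairing, Function.comp_def] using hmem
        have hfn : (pvPairing ws lem).2 = [] := by
          apply pv_filter_nil
          simpa [PySem.Set.mem_ofList] using hmem
        rw [PySem.Set.add_of_not_mem hmem]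
        simp only [pvStepA, hk, hcon, Bool.false_eq_true, if_false, PySem.Dict.modify,
          PySem.Dict.getD_insert_self, List.nil_append]
        apply PySem.Dict.ext
        rw [PySem.Dict.items_insert_of_contains _ _
            (PySem.Dict.contains_insert_self _ _ _),
          PySem.Dict.items_insert_of_not_contains _ _ hcon]
        show (((PySem.Set.ofList (ws.filterMap pvLemmaOf)).map (pvPairing ws))
            ++ [(lem, [])]).map _
          = ((PySem.Set.ofList (ws.filterMap pvLemmaOf)) ++ [lem]).map _
        rw [List.map_append, List.map_append, List.map_map]
        congr 1
        · apply List.map_congr_left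
          intro l hl
          have hne : l ≠ lem := by rintro rfl; exact hmem hl
          simp [pvPairing, hne, Ne.symm hne]
        · simp [hfn]

-- A's outer enumerate-fold, generalized over the start index
lemma pv_outer (loc : List (List (List (String × String)))) (sents : List String) :
    ∀ (k : Nat) (acc : List (List (String × List (List (String × String))))),
    k + sents.length ≤ loc.length →
    (PySem.List.enumerate sents (k : Int)).foldl
      (fun acc iw =>
        let words := (PySem.List.pyGet? loc iw.1).getD []
        let lemma_map := words.foldl pvStepA PySem.Dict.empty
        acc ++ [lemma_map.items]) acc
      = acc ++ ((loc.drop k).take sents.length).map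
          (fun words => (words.foldl pvStepA PySem.Dict.empty).items) := by
  induction sents with
  | nil => intro k acc _; simp [PySem.List.enumerate]
  | cons s ss ih =>
    intro k acc h
    have hk : k < loc.length := by simp at h; omega
    rw [PySem.List.enumerate_cons, List.foldl_cons]
    have hcast : ((k : Int) + 1) = ((k + 1 : Nat) : Int) := by push_cast; ring
    rw [hcast, ih (k + 1) _ (by simp at h ⊢; omega)]
    rw [List.drop_eq_getElem_cons hk]
    have hg : PySem.List.pyGet? loc (k : Int) = some loc[k] := by
      rw [PySem.List.pyGet?_natCast]
      exact List.getElem?_eq_getElem hk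
    simp only [hg, Option.getD_some, List.length_cons, List.take_succ_cons, List.map_cons,
      List.append_assoc, List.singleton_append]

-- ===== VERDICT (by name: the statement is the Claim_ definition above) =====
theorem get_repetitions_spec : Claim_equal_get_repetitions := by
  intro sentences location _ hpre
  unfold Spec_get_repetitions get_repetitions get_repetitions_alt
  have h0 : PySem.List.enumerate sentences 0
      = PySem.List.enumerate sentences ((0 : Nat) : Int) := by norm_num
  rw [h0, pv_outer location sentences 0 [] (by simpa using hpre.1)]
  rw [PySem.List.slice_to_natCast]
  simp only [List.drop_zero, List.nil_append]
  apply List.map_congr_left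
  intro words _
  rw [pv_fold_eq_group]
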